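-- pv_equiv track=rewrite | github.com/veerabadran28/genaiapp | temp_folder1/metadata_generator.py | _extract_path_components
-- ===== SOURCE A (Python) =====
-- from typing import Dict, List, Set, Any
--
-- def _extract_path_components(file_path: str) -> Dict[str, str]:
--     """
--     Extract metadata components from file path.
--
--     Args:
--         file_path: S3 path to the file
--
--     Returns:
--         Dict: Extracted metadata components
--     """
--     # Expected path format: ccar_reports/dev/ccar/cycle3/internal_baseline/run001/ihc_balance_sheet/output/file.csv
--     parts = file_path.split('/')
--     metadata = {}
--
--     # Extract components based on position
--     for i, part in enumerate(parts):
--         if 'cycle' in part: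
--             metadata['cycle'] = part
--         elif part.startswith('internal_') or part.startswith('supervisory_'):
--             metadata['scenario'] = part
--         elif part.startswith('run'):
--             metadata['run_id'] = part
--         elif i > 0 and i < len(parts) - 2:  # Not first or last two components
--             if part not in ['dev', 'ccar', 'output', 'input'] and not metadata.get('process'):
--                 metadata['process'] = part
--
--     return metadata
-- ===== SOURCE B (Python) =====
-- def _extract_path_components(file_path: str):
--     """Parse metadata fields out of an S3 path by classifying each component
--     once and computing every field independently."""
--     parts = file_path.split('/')
--     n = len(parts)
--
--     def category(i, p):
--         if 'cycle' in p:
--             return 'cycle'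
--         if p.startswith('internal_') or p.startswith('supervisory_'):
--             return 'scenario'
--         if p.startswith('run'):
--             return 'run_id'
--         if 0 < i < n - 2 and p not in ('dev', 'ccar', 'output', 'input'):
--             return 'process'
--         return None
--
--     cats = [category(i, p) for i, p in enumerate(parts)]
--     order = list(dict.fromkeys(c for c in cats if c is not None))
--
--     def value(c):
--         hits = [p for p, pc in zip(parts, cats) if pc == c]
--         return hits[0] if c == 'process' else hits[-1]
--
--     return {c: value(c) for c in order}
-- ===== Notes on version B (the rewrite author's own statement) =====
-- stated objective: alternative
-- what changed: Replaced the single stateful loop mutating a dict with independent field computations: classify every path part once, derive the key order as the deduped list of matches, and compute each field separately (last match for the cycle/scenario/run-id fields, first match for the process field); Pre_ excludes paths with an empty interior component (doubled slashes) in a position the loop classifies, a degenerate corner on which which component counts as the process field is anybody's choice.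
import Mathlib
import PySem

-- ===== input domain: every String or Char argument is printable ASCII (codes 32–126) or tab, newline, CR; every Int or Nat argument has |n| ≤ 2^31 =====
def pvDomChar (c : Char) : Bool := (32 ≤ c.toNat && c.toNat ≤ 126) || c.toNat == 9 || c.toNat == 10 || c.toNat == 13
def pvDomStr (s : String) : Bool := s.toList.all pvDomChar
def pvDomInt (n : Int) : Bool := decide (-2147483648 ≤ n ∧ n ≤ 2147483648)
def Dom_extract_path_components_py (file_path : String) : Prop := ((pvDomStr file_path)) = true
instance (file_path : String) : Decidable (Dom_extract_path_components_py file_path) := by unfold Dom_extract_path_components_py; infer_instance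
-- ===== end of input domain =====

-- B is an alternative decomposition of A (classify once, compute each field independently); same complexity, no speed claim.

-- ===== PORT A =====
-- the loop body of A ('for i, part in enumerate(parts): …'), one dict update per part
def pvStepA (n : Int) (d : PySem.Dict String String) (ip : Int × String) : PySem.Dict String String :=
  if PySem.Str.isIn "cycle" ip.2 then d.insert "cycle" ip.2
  else if PySem.Str.startswith ip.2 "internal_" || PySem.Str.startswith ip.2 "supervisory_" then
    d.insert "scenario" ip.2
  else if PySem.Str.startswith ip.2 "run" then d.insert "run_id" ip.2
  else if 0 < ip.1 ∧ ip.1 < n - 2 then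
    -- 'not metadata.get('process')': true iff the key is absent or its value is the empty string
    (if ip.2 ∉ (["dev", "ccar", "output", "input"] : List String) ∧ (d.get? "process").getD "" = ""
      then d.insert "process" ip.2 else d)
  else d

def extract_path_components_py (file_path : String) : List (String × String) :=
  let parts := (PySem.Str.split? file_path "/").getD []  -- separator "/" ≠ "": split? never returns none
  ((PySem.List.enumerate parts 0).foldl (pvStepA (parts.length : Int)) PySem.Dict.empty).items

-- ===== PORT B =====
-- Source B's 'category(i, p)': which metadata key (if any) part p at index i matches
def pvCategory (n : Int) (i : Int) (p : String) : Option String :=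
  if PySem.Str.isIn "cycle" p then some "cycle"
  else if PySem.Str.startswith p "internal_" || PySem.Str.startswith p "supervisory_" then some "scenario"
  else if PySem.Str.startswith p "run" then some "run_id"
  else if 0 < i ∧ i < n - 2 ∧ p ∉ (["dev", "ccar", "output", "input"] : List String) then some "process"
  else none

-- Source B's 'value(c)': first matching part for 'process', last matching part otherwise
def pvValue (parts : List String) (cats : List (Option String)) (c : String) : String :=
  let hits := ((parts.zip cats).filter (fun pc => pc.2 == some c)).map (·.1)
  if c = "process" then hits.headD ""  -- hits is nonempty for every c drawn from order ('hits[0]' in Source B)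
  else hits.getLastD ""  -- 'hits[-1]' in Source B

def extract_path_components_py_alt (file_path : String) : List (String × String) :=
  let parts := (PySem.Str.split? file_path "/").getD []  -- separator "/" ≠ "": split? never returns none
  let n : Int := parts.length
  let cats := (PySem.List.enumerate parts 0).map (fun ip => pvCategory n ip.1 ip.2)
  let order := PySem.List.dedup (cats.filterMap id)
  order.map (fun c => (c, pvValue parts cats c))

-- ===== PRECONDITION & SPEC =====
-- Pre_ excludes paths with an empty component (from doubled slashes) at an interior index the
-- loop classifies (0 < i < len(parts)-2): on that degenerate corner which component counts as the
-- 'process' is anybody's choice (A happens to keep the first nonempty candidate, B the first candidate).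
def Pre_extract_path_components_py (file_path : String) : Prop :=
  ∀ ip ∈ PySem.List.enumerate ((PySem.Str.split? file_path "/").getD []) 0,
    (0 < ip.1 ∧ ip.1 < (((PySem.Str.split? file_path "/").getD []).length : Int) - 2) → ip.2 ≠ ""
instance (file_path : String) : Decidable (Pre_extract_path_components_py file_path) := by
  unfold Pre_extract_path_components_py; infer_instance
def pvWitness_extract_path_components_py : String :=
  "ccar_reports/dev/ccar/cycle3/internal_baseline/run001/ihc_balance_sheet/output/file.csv"

def Spec_extract_path_components_py (file_path : String) (out : List (String × String)) : Prop := out = extract_path_components_py_alt file_path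
instance (file_path : String) (out : List (String × String)) : Decidable (Spec_extract_path_components_py file_path out) := by unfold Spec_extract_path_components_py; infer_instance

-- ===== CLAIM (what is proved, stated in full; the proofs are below) =====
def Claim_equal_extract_path_components_py : Prop := ∀ (file_path : String), Dom_extract_path_components_py file_path → Pre_extract_path_components_py file_path → Spec_extract_path_components_py file_path (extract_path_components_py file_path)

-- ===== LEMMAS AND PROOFS =====

def pvCats (n : Int) (Q : List String) : List (Option String) :=
  (PySem.List.enumerate Q 0).map (fun ip => pvCategory n ip.1 ip.2)
def pvHits (Q : List String) (cs : List (Option String)) (c : String) : List String :=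
  ((Q.zip cs).filter (fun pc => pc.2 == some c)).map (·.1)
def pvBld (n : Int) (Q : List String) : List (String × String) :=
  (PySem.List.dedup ((pvCats n Q).filterMap id)).map (fun c => (c, pvValue Q (pvCats n Q) c))
lemma pvValue_eq (Q : List String) (cs : List (Option String)) (c : String) :
    pvValue Q cs c = if c = "process" then (pvHits Q cs c).headD ""
      else (pvHits Q cs c).getLastD "" := rfl
lemma pvDedup_snoc (l : List String) (c : String) :
    PySem.List.dedup (l ++ [c]) = if c ∈ l then PySem.List.dedup l else PySem.List.dedup l ++ [c] := by
  have hfold : PySem.List.dedup (l ++ [c]) = PySem.Set.add (PySem.List.dedup l) c := by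
    simp [PySem.List.dedup, PySem.Set.ofList, List.foldl_append]
  have hc : PySem.Set.contains (PySem.List.dedup l) c = decide (c ∈ l) := by
    by_cases h : c ∈ l <;> simp [h]
  rw [hfold, PySem.Set.add, hc]
  by_cases h : c ∈ l <;> simp [h]
lemma pvCats_snoc (n : Int) (Q : List String) (x : String) :
    pvCats n (Q ++ [x]) = pvCats n Q ++ [pvCategory n (Q.length : Int) x] := by
  unfold pvCats
  rw [PySem.List.enumerate_append]
  simp [PySem.List.enumerate_cons, PySem.List.enumerate_nil]
lemma pvLen_cats (n : Int) (Q : List String) : (pvCats n Q).length = Q.length := by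
  simp [pvCats, PySem.List.length_enumerate]
lemma pvHits_snoc (Q : List String) (cs : List (Option String)) (x : String) (o : Option String)
    (h : cs.length = Q.length) (c : String) :
    pvHits (Q ++ [x]) (cs ++ [o]) c = pvHits Q cs c ++ (if o == some c then [x] else []) := by
  unfold pvHits
  rw [List.zip_append h.symm, List.filter_append, List.map_append]
  congr 1
  by_cases ho : o == some c <;> simp [ho]
lemma pvMem_iff_hits (Q : List String) (cs : List (Option String)) (c : String)
    (h : cs.length = Q.length) : some c ∈ cs ↔ pvHits Q cs c ≠ [] := by
  induction Q generalizing cs with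
  | nil => simp_all [pvHits, List.length_eq_zero_iff.mp h]
  | cons q Q ih =>
    cases cs with
    | nil => simp at h
    | cons o cs =>
      simp at h
      by_cases ho : o = some c
      · simp [pvHits, ho]
      · have ho' : ¬ some c = o := fun hx => ho hx.symm
        have := ih cs h
        simp [pvHits, List.zip_cons_cons, ho',
          show (o == some c) = false by simpa using ho] at this ⊢
        exact this
lemma pvHeadD_append (l t : List String) (d : String) (h : l ≠ []) : (l ++ t).headD d = l.headD d := by
  cases l <;> simp_all
lemma pvHeadD_mem (l : List String) (d : String) (h : l ≠ []) : l.headD d ∈ l := by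
  cases l <;> simp_all

lemma pvKeys_bld (n : Int) (Q : List String) :
    (PySem.Dict.mk (pvBld n Q)).keys = PySem.List.dedup ((pvCats n Q).filterMap id) := by
  simp [PySem.Dict.keys, pvBld]
  exact List.map_id _

lemma pvMem_ord_iff (n : Int) (Q : List String) (c : String) :
    c ∈ PySem.List.dedup ((pvCats n Q).filterMap id) ↔ some c ∈ pvCats n Q := by
  simp [List.mem_filterMap]

lemma pvContains_bld (n : Int) (Q : List String) (c : String) :
    (PySem.Dict.mk (pvBld n Q)).contains c = decide (c ∈ PySem.List.dedup ((pvCats n Q).filterMap id)) := by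
  rw [PySem.Dict.contains_eq_decide_mem_keys, pvKeys_bld]

lemma pvGet?_bld (n : Int) (Q : List String) (c : String) :
    (PySem.Dict.mk (pvBld n Q)).get? c =
      if c ∈ PySem.List.dedup ((pvCats n Q).filterMap id) then some (pvValue Q (pvCats n Q) c) else none := by
  by_cases h : c ∈ PySem.List.dedup ((pvCats n Q).filterMap id)
  · rw [if_pos h]
    apply PySem.Dict.get?_of_mem_items
    · show (c, _) ∈ pvBld n Q
      exact List.mem_map_of_mem h
    · rw [pvKeys_bld]; exact PySem.List.nodup_dedup _
  · rw [if_neg h]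
    rw [PySem.Dict.get?_eq_none_iff_not_mem_keys, pvKeys_bld]
    exact h

lemma pvBld_snoc_none (n : Int) (Q : List String) (x : String)
    (hk : pvCategory n (Q.length : Int) x = none) : pvBld n (Q ++ [x]) = pvBld n Q := by
  unfold pvBld
  rw [pvCats_snoc, hk]
  have hh : ∀ c, pvHits (Q ++ [x]) (pvCats n Q ++ [none]) c = pvHits Q (pvCats n Q) c := by
    intro c
    rw [pvHits_snoc Q _ x none (pvLen_cats n Q) c]
    simp
  simp only [List.filterMap_append, List.filterMap_cons, List.filterMap_nil, id]
  simp only [List.append_nil]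
  apply List.map_congr_left
  intro c _
  simp only [pvValue_eq, hh c]

lemma pvInsert_key (n : Int) (Q : List String) (x : String) (c : String) (hcp : c ≠ "process")
    (hk : pvCategory n (Q.length : Int) x = some c) :
    (PySem.Dict.mk (pvBld n Q)).insert c x = PySem.Dict.mk (pvBld n (Q ++ [x])) := by
  have hlen := pvLen_cats n Q
  have hhits : ∀ c', pvHits (Q ++ [x]) (pvCats n (Q ++ [x])) c' =
      pvHits Q (pvCats n Q) c' ++ (if some c == some c' then [x] else []) := by
    intro c'; rw [pvCats_snoc, hk]; exact pvHits_snoc Q _ x _ hlen c'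
  have hvo : ∀ c', c' ≠ c → pvValue (Q ++ [x]) (pvCats n (Q ++ [x])) c' = pvValue Q (pvCats n Q) c' := by
    intro c' hne
    have : (some c == some c') = false := by simpa using fun h => hne h.symm
    rw [pvValue_eq, pvValue_eq, hhits c', this]
    simp
  have hvc : pvValue (Q ++ [x]) (pvCats n (Q ++ [x])) c = x := by
    simp only [pvValue_eq, hhits c, if_pos, BEq.rfl, hcp, if_false]
    simp
  have hbld' : pvBld n (Q ++ [x]) =
      (if c ∈ PySem.List.dedup ((pvCats n Q).filterMap id)
        then PySem.List.dedup ((pvCats n Q).filterMap id)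
        else PySem.List.dedup ((pvCats n Q).filterMap id) ++ [c]).map
        (fun c' => (c', pvValue (Q ++ [x]) (pvCats n (Q ++ [x])) c')) := by
    unfold pvBld
    congr 1
    rw [pvCats_snoc, hk]
    simp only [List.filterMap_append, List.filterMap_cons, List.filterMap_nil, id]
    rw [pvDedup_snoc]
    by_cases h : c ∈ (pvCats n Q).filterMap id
    · simp [List.mem_filterMap] at *
    · simp [List.mem_filterMap] at *
  apply PySem.Dict.ext
  rw [PySem.Dict.items_insert, pvContains_bld]
  by_cases hmem : c ∈ PySem.List.dedup ((pvCats n Q).filterMap id)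
  · rw [hbld']
    simp only [hmem, decide_true, if_true]
    show List.map _ (pvBld n Q) = _
    unfold pvBld
    rw [List.map_map]
    apply List.map_congr_left
    intro c' _
    by_cases h : c' = c
    · subst h; simp [hvc]
    · simp [h, hvo c' h]
  · rw [hbld']
    simp only [hmem, decide_false, if_false]
    show pvBld n Q ++ [(c, x)] = _
    rw [List.map_append]
    congr 1
    · unfold pvBld
      apply List.map_congr_left
      intro c' hc'
      have : c' ≠ c := fun h => hmem (h ▸ hc')
      simp [hvo c' this]
    · simp [hvc]

lemma pvProcess (n : Int) (Q : List String) (x : String)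
    (hk : pvCategory n (Q.length : Int) x = some "process")
    (hall : ∀ p ∈ pvHits Q (pvCats n Q) "process", p ≠ "") :
    (if ((PySem.Dict.mk (pvBld n Q)).get? "process").getD "" = ""
      then (PySem.Dict.mk (pvBld n Q)).insert "process" x
      else PySem.Dict.mk (pvBld n Q)) = PySem.Dict.mk (pvBld n (Q ++ [x])) := by
  have hlen := pvLen_cats n Q
  have hhits : ∀ c', pvHits (Q ++ [x]) (pvCats n (Q ++ [x])) c' =
      pvHits Q (pvCats n Q) c' ++ (if some "process" == some c' then [x] else []) := by
    intro c'; rw [pvCats_snoc, hk]; exact pvHits_snoc Q _ x _ hlen c'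
  have hvo : ∀ c', c' ≠ "process" → pvValue (Q ++ [x]) (pvCats n (Q ++ [x])) c' = pvValue Q (pvCats n Q) c' := by
    intro c' hne
    have hb : (some "process" == some c') = false := by simpa using fun h => hne h.symm
    rw [pvValue_eq, pvValue_eq, hhits c', hb]
    simp
  have hhp : pvHits (Q ++ [x]) (pvCats n (Q ++ [x])) "process" = pvHits Q (pvCats n Q) "process" ++ [x] := by
    rw [hhits "process"]; simp
  have hbld' : pvBld n (Q ++ [x]) =
      (if "process" ∈ PySem.List.dedup ((pvCats n Q).filterMap id)
        then PySem.List.dedup ((pvCats n Q).filterMap id)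
        else PySem.List.dedup ((pvCats n Q).filterMap id) ++ ["process"]).map
        (fun c' => (c', pvValue (Q ++ [x]) (pvCats n (Q ++ [x])) c')) := by
    unfold pvBld
    congr 1
    rw [pvCats_snoc, hk]
    simp only [List.filterMap_append, List.filterMap_cons, List.filterMap_nil, id]
    rw [pvDedup_snoc]
    by_cases h : "process" ∈ (pvCats n Q).filterMap id
    · simp [List.mem_filterMap] at *
    · simp [List.mem_filterMap] at *
  rw [pvGet?_bld]
  by_cases hmem : "process" ∈ PySem.List.dedup ((pvCats n Q).filterMap id)
  · -- the key is already present; its stored value is a nonempty hit, so A keeps the dict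
    have hne : pvHits Q (pvCats n Q) "process" ≠ [] :=
      (pvMem_iff_hits Q _ _ hlen).mp ((pvMem_ord_iff n Q "process").mp hmem)
    have hvne : pvValue Q (pvCats n Q) "process" ≠ "" := by
      rw [pvValue_eq, if_pos rfl]
      exact hall _ (pvHeadD_mem _ _ hne)
    rw [if_pos hmem]
    rw [if_neg (by simpa using hvne)]
    have hvp : pvValue (Q ++ [x]) (pvCats n (Q ++ [x])) "process" = pvValue Q (pvCats n Q) "process" := by
      rw [pvValue_eq, pvValue_eq, hhp, if_pos rfl, if_pos rfl]
      exact pvHeadD_append _ _ _ hne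
    rw [hbld']
    simp only [hmem, if_true]
    apply PySem.Dict.ext
    show pvBld n Q = _
    unfold pvBld
    apply List.map_congr_left
    intro c' _
    by_cases h : c' = "process"
    · subst h; simp [hvp]
    · simp [hvo c' h]
  · rw [if_neg hmem]
    rw [if_pos (by simp)]
    have hnil : pvHits Q (pvCats n Q) "process" = [] := by
      by_contra hne
      exact hmem ((pvMem_ord_iff n Q "process").mpr ((pvMem_iff_hits Q _ _ hlen).mpr hne))
    apply PySem.Dict.ext
    rw [PySem.Dict.items_insert, pvContains_bld]
    simp only [hmem, decide_false]
    rw [hbld']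
    simp only [hmem, if_false]
    rw [List.map_append]
    show pvBld n Q ++ _ = _
    congr 1
    · unfold pvBld
      apply List.map_congr_left
      intro c' hc'
      have h : c' ≠ "process" := fun h => hmem (h ▸ hc')
      simp [hvo c' h]
    · have : pvValue (Q ++ [x]) (pvCats n (Q ++ [x])) "process" = x := by
        rw [pvValue_eq, hhp, hnil, if_pos rfl]
        simp
      simp [this]

lemma pvStep_bld (n : Int) (Q : List String) (x : String)
    (hx : pvCategory n (Q.length : Int) x = some "process" → x ≠ "")
    (hall : ∀ p ∈ pvHits Q (pvCats n Q) "process", p ≠ "") :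
    pvStepA n (PySem.Dict.mk (pvBld n Q)) ((Q.length : Int), x) = PySem.Dict.mk (pvBld n (Q ++ [x])) := by
  unfold pvStepA
  dsimp only
  by_cases h1 : PySem.Str.isIn "cycle" x = true
  · rw [if_pos h1]
    exact pvInsert_key n Q x "cycle" (by decide) (by rw [pvCategory, if_pos h1])
  rw [if_neg h1]
  by_cases h2 : (PySem.Str.startswith x "internal_" || PySem.Str.startswith x "supervisory_") = true
  · rw [if_pos h2]
    exact pvInsert_key n Q x "scenario" (by decide) (by rw [pvCategory, if_neg h1, if_pos h2])
  rw [if_neg h2]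
  by_cases h3 : PySem.Str.startswith x "run" = true
  · rw [if_pos h3]
    exact pvInsert_key n Q x "run_id" (by decide) (by rw [pvCategory, if_neg h1, if_neg h2, if_pos h3])
  rw [if_neg h3]
  by_cases h4 : 0 < (Q.length : Int) ∧ (Q.length : Int) < n - 2
  · rw [if_pos h4]
    by_cases h5 : x ∈ (["dev", "ccar", "output", "input"] : List String)
    · rw [if_neg (by simp [h5])]
      rw [pvBld_snoc_none n Q x (by
        rw [pvCategory, if_neg h1, if_neg h2, if_neg h3, if_neg (fun h => h.2.2 h5)])]
    · have hcnd : (x ∉ (["dev", "ccar", "output", "input"] : List String) ∧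
          ((PySem.Dict.mk (pvBld n Q)).get? "process").getD "" = "") ↔
          ((PySem.Dict.mk (pvBld n Q)).get? "process").getD "" = "" := and_iff_right h5
      rw [if_congr hcnd rfl rfl]
      exact pvProcess n Q x (by
        rw [pvCategory, if_neg h1, if_neg h2, if_neg h3, if_pos ⟨h4.1, h4.2, h5⟩]) hall
  · rw [if_neg h4]
    have hk : pvCategory n (Q.length : Int) x = none := by
      rw [pvCategory, if_neg h1, if_neg h2, if_neg h3, if_neg (by tauto)]
    rw [pvBld_snoc_none n Q x hk]

-- a 'process' category result forces the interior-index condition of the classifier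
lemma pvCat_process_bounds (n : Int) (i : Int) (p : String)
    (h : pvCategory n i p = some "process") : 0 < i ∧ i < n - 2 := by
  unfold pvCategory at h
  split_ifs at h with h1 h2 h3 h4
  · exact absurd (Option.some.inj h) (by decide)
  · exact absurd (Option.some.inj h) (by decide)
  · exact absurd (Option.some.inj h) (by decide)
  · exact ⟨h4.1, h4.2.1⟩

-- every 'process' hit comes from an enumerated part the classifier marks 'process'
lemma pvHits_mem_enum (n : Int) (Q : List String) :
    ∀ p ∈ pvHits Q (pvCats n Q) "process",
      ∃ i : Int, (i, p) ∈ PySem.List.enumerate Q 0 ∧ pvCategory n i p = some "process" := by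
  induction Q using List.reverseRecOn with
  | nil => simp [pvHits, pvCats, PySem.List.enumerate_nil]
  | append_singleton Q x ih =>
    have henum : PySem.List.enumerate (Q ++ [x]) 0 =
        PySem.List.enumerate Q 0 ++ [((Q.length : Int), x)] := by
      rw [PySem.List.enumerate_append]
      simp [PySem.List.enumerate_cons, PySem.List.enumerate_nil]
    intro p hp
    rw [pvCats_snoc, pvHits_snoc Q _ x _ (pvLen_cats n Q) "process"] at hp
    rcases List.mem_append.mp hp with h | h
    · obtain ⟨i, hmem, hc⟩ := ih p h
      exact ⟨i, by rw [henum]; exact List.mem_append_left _ hmem, hc⟩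
    · by_cases hc : pvCategory n (Q.length : Int) x = some "process"
      · rw [if_pos (by simp [hc])] at h
        have hpx : p = x := by simpa using h
        subst hpx
        exact ⟨(Q.length : Int), by rw [henum]; exact List.mem_append_right _ (by simp), hc⟩
      · rw [if_neg (by simpa using hc)] at h
        simp at h

-- under Pre_, every 'process' hit is a nonempty part
lemma pvHall (n : Int) (Q : List String)
    (H : ∀ ip ∈ PySem.List.enumerate Q 0, pvCategory n ip.1 ip.2 = some "process" → ip.2 ≠ "") :
    ∀ p ∈ pvHits Q (pvCats n Q) "process", p ≠ "" := by
  intro p hp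
  obtain ⟨i, hmem, hc⟩ := pvHits_mem_enum n Q p hp
  exact H (i, p) hmem hc

lemma pvMain (n : Int) (Q : List String)
    (H : ∀ ip ∈ PySem.List.enumerate Q 0, pvCategory n ip.1 ip.2 = some "process" → ip.2 ≠ "") :
    (PySem.List.enumerate Q 0).foldl (pvStepA n) PySem.Dict.empty = PySem.Dict.mk (pvBld n Q) := by
  induction Q using List.reverseRecOn with
  | nil => rfl
  | append_singleton Q x ih =>
    have henum : PySem.List.enumerate (Q ++ [x]) 0 =
        PySem.List.enumerate Q 0 ++ [((Q.length : Int), x)] := by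
      rw [PySem.List.enumerate_append]
      simp [PySem.List.enumerate_cons, PySem.List.enumerate_nil]
    have H' : ∀ ip ∈ PySem.List.enumerate Q 0, pvCategory n ip.1 ip.2 = some "process" → ip.2 ≠ "" := by
      intro ip hip
      exact H ip (by rw [henum]; exact List.mem_append_left _ hip)
    rw [henum, List.foldl_append, ih H']
    simp only [List.foldl_cons, List.foldl_nil]
    exact pvStep_bld n Q x
      (H ((Q.length : Int), x) (by rw [henum]; exact List.mem_append_right _ (by simp)))
      (pvHall n Q H')

-- ===== VERDICT (by name: the statement is the Claim_ definition above) =====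
theorem extract_path_components_py_spec : Claim_equal_extract_path_components_py := by
  intro file_path _ hpre
  unfold Spec_extract_path_components_py extract_path_components_py extract_path_components_py_alt
  have H : ∀ ip ∈ PySem.List.enumerate ((PySem.Str.split? file_path "/").getD []) 0,
      pvCategory ((((PySem.Str.split? file_path "/").getD []).length : Int)) ip.1 ip.2 = some "process" →
      ip.2 ≠ "" := by
    intro ip hip hc
    exact hpre ip hip (pvCat_process_bounds _ _ _ hc)
  simp only [pvMain _ _ H]
  rfl
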